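-- pv_equiv track=rewrite | github.com/road3144/Algorithm | implement/bj_magicianSharkTornado_20057.py | directed_send
-- ===== SOURCE A (Python) =====
-- def directed_send(direct):
--     send_dr = [1, 1, 1, 2, 0, -1, -1, -1, -2]
--     send_dc = [-1, 0, 1, 0, -2, -1, 0, 1, 0]
--     send_percent = [10, 7, 1, 2, 5, 10, 7, 1, 2]
--     if direct == 0:
--         setting = [send_dr, send_dc, send_percent]
--         return setting
--     elif direct == 1:
--         for i in range(9):
--             send_dr[i] = send_dr[i] * -1
--             send_dc[i] = send_dc[i] * -1
--         setting = [send_dc, send_dr, send_percent]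
--         return setting
--     elif direct == 2:
--         for i in range(9):
--             send_dr[i] = send_dr[i] * -1
--             send_dc[i] = send_dc[i] * -1
--         setting = [send_dr, send_dc, send_percent]
--         return setting
--     elif direct == 3:
--         setting = [send_dc, send_dr, send_percent]
--         return setting
-- ===== SOURCE B (Python) =====
-- _SETTINGS = {
--     0: [[1, 1, 1, 2, 0, -1, -1, -1, -2],
--         [-1, 0, 1, 0, -2, -1, 0, 1, 0],
--         [10, 7, 1, 2, 5, 10, 7, 1, 2]],
--     1: [[1, 0, -1, 0, 2, 1, 0, -1, 0],
--         [-1, -1, -1, -2, 0, 1, 1, 1, 2],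
--         [10, 7, 1, 2, 5, 10, 7, 1, 2]],
--     2: [[-1, -1, -1, -2, 0, 1, 1, 1, 2],
--         [1, 0, -1, 0, 2, 1, 0, -1, 0],
--         [10, 7, 1, 2, 5, 10, 7, 1, 2]],
--     3: [[-1, 0, 1, 0, -2, -1, 0, 1, 0],
--         [1, 1, 1, 2, 0, -1, -1, -1, -2],
--         [10, 7, 1, 2, 5, 10, 7, 1, 2]],
-- }
--
-- def directed_send(direct):
--     rows = _SETTINGS.get(direct)
--     if rows is None:
--         return None
--     return [list(row) for row in rows]
-- ===== Notes on version B (the rewrite author's own statement) =====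
-- stated objective: simpler
-- what changed: Replaces A's branch-by-branch construction with in-place negation loops by a single precomputed lookup table holding the four complete settings as literals, returned (copied) via dict.get with None fall-through.
import Mathlib
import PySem

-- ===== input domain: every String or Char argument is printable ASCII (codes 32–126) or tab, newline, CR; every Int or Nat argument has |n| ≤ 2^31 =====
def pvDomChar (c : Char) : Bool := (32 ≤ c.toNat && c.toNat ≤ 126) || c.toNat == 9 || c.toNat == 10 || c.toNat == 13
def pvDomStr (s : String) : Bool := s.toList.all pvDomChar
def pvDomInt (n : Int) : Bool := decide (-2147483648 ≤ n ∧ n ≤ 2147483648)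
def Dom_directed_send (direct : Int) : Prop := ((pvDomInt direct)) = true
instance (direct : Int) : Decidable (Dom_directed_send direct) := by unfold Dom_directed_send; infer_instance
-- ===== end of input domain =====

-- B replaces A's per-branch construction (with in-place negation loops) by one precomputed
-- lookup table of the four complete settings, fetched with dict.get; objective: simpler.

-- ===== PORT A =====
-- Python's in-place `for i in range(9): send_dr[i] *= -1; send_dc[i] *= -1` is ported as a fold
-- over range(9) updating both lists with List.set at index i (i is always in range, so set is exact).
def directed_send (direct : Int) : Option (List (List Int)) :=
  let send_dr : List Int := [1, 1, 1, 2, 0, -1, -1, -1, -2]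
  let send_dc : List Int := [-1, 0, 1, 0, -2, -1, 0, 1, 0]
  let send_percent : List Int := [10, 7, 1, 2, 5, 10, 7, 1, 2]
  if direct = 0 then
    some [send_dr, send_dc, send_percent]
  else if direct = 1 then
    let p := (List.range 9).foldl
      (fun (s : List Int × List Int) i =>
        (s.1.set i (s.1.getD i 0 * (-1)), s.2.set i (s.2.getD i 0 * (-1))))
      (send_dr, send_dc)
    some [p.2, p.1, send_percent]
  else if direct = 2 then
    let p := (List.range 9).foldl
      (fun (s : List Int × List Int) i =>
        (s.1.set i (s.1.getD i 0 * (-1)), s.2.set i (s.2.getD i 0 * (-1))))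
      (send_dr, send_dc)
    some [p.1, p.2, send_percent]
  else if direct = 3 then
    some [send_dc, send_dr, send_percent]
  else
    none

-- ===== PORT B =====
-- B's module-level table _SETTINGS; dict → PySem.Dict (insertion order), .get → Dict.get?.
def directed_send_settings : PySem.Dict Int (List (List Int)) :=
  PySem.Dict.ofList
    [ (0, [[1, 1, 1, 2, 0, -1, -1, -1, -2],
           [-1, 0, 1, 0, -2, -1, 0, 1, 0],
           [10, 7, 1, 2, 5, 10, 7, 1, 2]]),
      (1, [[1, 0, -1, 0, 2, 1, 0, -1, 0],
           [-1, -1, -1, -2, 0, 1, 1, 1, 2],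
           [10, 7, 1, 2, 5, 10, 7, 1, 2]]),
      (2, [[-1, -1, -1, -2, 0, 1, 1, 1, 2],
           [1, 0, -1, 0, 2, 1, 0, -1, 0],
           [10, 7, 1, 2, 5, 10, 7, 1, 2]]),
      (3, [[-1, 0, 1, 0, -2, -1, 0, 1, 0],
           [1, 1, 1, 2, 0, -1, -1, -1, -2],
           [10, 7, 1, 2, 5, 10, 7, 1, 2]]) ]

def directed_send_alt (direct : Int) : Option (List (List Int)) :=
  match PySem.Dict.get? directed_send_settings direct with
  | none => none
  | some rows => some (rows.map (fun row => row.map id))  -- Source B copies each row: list(row)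

-- ===== PRECONDITION & SPEC =====
def Spec_directed_send (direct : Int) (out : Option (List (List Int))) : Prop := out = directed_send_alt direct
instance (direct : Int) (out : Option (List (List Int))) : Decidable (Spec_directed_send direct out) := by unfold Spec_directed_send; infer_instance

-- ===== CLAIM (what is proved, stated in full; the proofs are below) =====
def Claim_equal_directed_send : Prop := ∀ (direct : Int), Dom_directed_send direct → Spec_directed_send direct (directed_send direct)

-- ===== LEMMAS AND PROOFS =====

-- ===== VERDICT (by name: the statement is the Claim_ definition above) =====
theorem directed_send_spec : Claim_equal_directed_send := by
  intro direct _
  unfold Spec_directed_send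
  by_cases h0 : direct = 0
  · subst h0; decide
  · by_cases h1 : direct = 1
    · subst h1; decide
    · by_cases h2 : direct = 2
      · subst h2; decide
      · by_cases h3 : direct = 3
        · subst h3; decide
        · have e0 : ((0 : Int) == direct) = false := by rw [beq_eq_false_iff_ne]; exact fun h => h0 h.symm
          have e1 : ((1 : Int) == direct) = false := by rw [beq_eq_false_iff_ne]; exact fun h => h1 h.symm
          have e2 : ((2 : Int) == direct) = false := by rw [beq_eq_false_iff_ne]; exact fun h => h2 h.symm
          have e3 : ((3 : Int) == direct) = false := by rw [beq_eq_false_iff_ne]; exact fun h => h3 h.symm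
          simp [directed_send, directed_send_alt, directed_send_settings,
                PySem.Dict.ofList, PySem.Dict.get?, PySem.Dict.empty, PySem.Dict.update,
                PySem.Dict.insert, PySem.Dict.contains, List.find?,
                h0, h1, h2, h3, e0, e1, e2, e3]
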